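-- pv_equiv track=rewrite | github.com/mko3000/tira | tira_vk2/forbidden.py | count
-- ===== SOURCE A (Python) =====
-- def count(s, c):
--     result = 0
--     counter = 0
--     for i in range(len(s)):
--         if s[i] == c:
--             counter = 0
--         else:
--             counter += 1
--         result += counter
--     return result
-- ===== SOURCE B (Python) =====
-- def count(s, c):
--     result = 0
--     run = 0
--     for ch in s:
--         if ch == c:
--             result += run * (run + 1) // 2
--             run = 0
--         else:
--             run += 1
--     result += run * (run + 1) // 2
--     return result
-- ===== Notes on version B (the rewrite author's own statement) =====
-- stated objective: alternative
-- what changed: Instead of adding the running counter at every position, B detects maximal runs of non-c characters and adds each run's closed-form contribution L*(L+1)//2 once per run.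
import Mathlib
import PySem

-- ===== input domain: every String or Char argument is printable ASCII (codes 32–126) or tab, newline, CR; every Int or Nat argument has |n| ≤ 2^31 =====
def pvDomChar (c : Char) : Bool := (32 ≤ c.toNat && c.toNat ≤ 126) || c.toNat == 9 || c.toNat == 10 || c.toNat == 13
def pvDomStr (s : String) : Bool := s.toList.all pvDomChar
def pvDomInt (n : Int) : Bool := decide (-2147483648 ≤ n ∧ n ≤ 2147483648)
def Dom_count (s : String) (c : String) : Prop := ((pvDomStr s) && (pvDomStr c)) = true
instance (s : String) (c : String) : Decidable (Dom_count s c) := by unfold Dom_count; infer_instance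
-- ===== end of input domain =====

-- B counts substrings without c by summing L*(L+1)//2 over maximal runs of non-c characters,
-- instead of A's per-position running counter; same O(n) cost, different decomposition.

-- ===== PORT A =====
-- for i in range(len(s)): s[i] is a one-char string compared to c; the loop carries (result, counter).
def count (s : String) (c : String) : Int :=
  (s.toList.foldl
    (fun (p : Int × Int) (ch : Char) =>
      let counter : Int := if String.ofList [ch] = c then 0 else p.2 + 1
      (p.1 + counter, counter))
    (0, 0)).1

-- ===== PORT B =====
-- run-based scan: on each c (or at the end) close the current run of length `run`
-- and add run*(run+1)//2 (PySem.Int.floordiv = Python's //).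
def countRuns : List Char → String → Int → Int
  | [], _, run => PySem.Int.floordiv (run * (run + 1)) 2
  | ch :: t, c, run =>
      if String.ofList [ch] = c then
        PySem.Int.floordiv (run * (run + 1)) 2 + countRuns t c 0
      else
        countRuns t c (run + 1)

def count_alt (s : String) (c : String) : Int := countRuns s.toList c 0

-- ===== PRECONDITION & SPEC =====
def Spec_count (s : String) (c : String) (out : Int) : Prop := out = count_alt s c
instance (s : String) (c : String) (out : Int) : Decidable (Spec_count s c out) := by unfold Spec_count; infer_instance

-- ===== CLAIM (what is proved, stated in full; the proofs are below) =====
def Claim_equal_count : Prop := ∀ (s : String) (c : String), Dom_count s c → Spec_count s c (count s c)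

-- ===== LEMMAS AND PROOFS =====

-- triangular-number step: for 0 ≤ k, T(k+1) = T(k) + (k+1), with Python floor division
theorem tri_step (k : Int) (hk : 0 ≤ k) :
    PySem.Int.floordiv ((k + 1) * (k + 1 + 1)) 2
      = PySem.Int.floordiv (k * (k + 1)) 2 + (k + 1) := by
  rw [PySem.Int.floordiv_eq_ediv_of_pos (by omega),
      PySem.Int.floordiv_eq_ediv_of_pos (by omega)]
  have h : (k + 1) * (k + 1 + 1) = k * (k + 1) + (k + 1) * 2 := by ring
  rw [h, Int.add_mul_ediv_right _ _ (by omega : (2:Int) ≠ 0)]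

-- loop invariant: A's fold from (r, k) equals r + countRuns from run-length k, minus T(k)
theorem fold_eq_runs (c : String) (l : List Char) :
    ∀ (r k : Int), 0 ≤ k →
      (l.foldl
        (fun (p : Int × Int) (ch : Char) =>
          let counter : Int := if String.ofList [ch] = c then 0 else p.2 + 1
          (p.1 + counter, counter))
        (r, k)).1
      = r + countRuns l c k - PySem.Int.floordiv (k * (k + 1)) 2 := by
  induction l with
  | nil =>
      intro r k hk
      simp [countRuns]
  | cons ch t ih =>
      intro r k hk
      by_cases h : String.ofList [ch] = c
      · simp only [List.foldl_cons, h, if_pos, countRuns]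
        rw [ih (r + 0) 0 le_rfl]
        simp [PySem.Int.floordiv]
        ring
      · simp only [List.foldl_cons, h, countRuns, if_false]
        rw [ih (r + (k + 1)) (k + 1) (by omega)]
        have := tri_step k hk
        omega

-- ===== VERDICT (by name: the statement is the Claim_ definition above) =====
theorem count_spec : Claim_equal_count := by
  intro s c _
  unfold Spec_count count count_alt
  rw [fold_eq_runs c s.toList 0 0 le_rfl]
  simp [PySem.Int.floordiv]
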